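-- pv_equiv track=rewrite | github.com/c12i/lc | 3931-process-string-with-special-operations-i/2025-07-13 16.32.30 - Accepted - runtime 52ms - memory 22.2MB.py | processStr
-- ===== SOURCE A (Python) =====
-- def processStr(s):
--     """
--     :type s: str
--     :rtype: str
--     """
--     result = []
--
--     for c in s:
--         if c == '*':
--             if result:
--                 result.pop()
--         elif c == '#':
--             if result:
--                 result.extend(result)
--         elif c == '%':
--             if result:
--                 result = result[::-1]
--         else:
--             result.append(c)
--
--     return "".join(result)
-- ===== SOURCE B (Python) =====
-- def processStr(s):
--     """
--     :type s: str
--     :rtype: str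
--     """
--     # two-stack deque: the logical string is front[::-1] + back,
--     # so '%' (reverse) is an O(1) swap of the two stacks instead of a copy
--     front, back = [], []
--     for c in s:
--         if c == '*':
--             if back:
--                 back.pop()
--             elif front:
--                 back = front[::-1]
--                 front = []
--                 back.pop()
--         elif c == '#':
--             if front or back:
--                 t = front[::-1] + back
--                 front = []
--                 back = t + t
--         elif c == '%':
--             front, back = back, front
--         else:
--             back.append(c)
--     return "".join(front[::-1] + back)
-- ===== Notes on version B (the rewrite author's own statement) =====
-- stated objective: alternative
-- what changed: replaces A's single list (reversed by a full O(L) copy on '%') with a two-stack deque whose reverse is an O(1) swap of the two stacks; only '#' doublings and stack transfers materialize the buffer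
import Mathlib
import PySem

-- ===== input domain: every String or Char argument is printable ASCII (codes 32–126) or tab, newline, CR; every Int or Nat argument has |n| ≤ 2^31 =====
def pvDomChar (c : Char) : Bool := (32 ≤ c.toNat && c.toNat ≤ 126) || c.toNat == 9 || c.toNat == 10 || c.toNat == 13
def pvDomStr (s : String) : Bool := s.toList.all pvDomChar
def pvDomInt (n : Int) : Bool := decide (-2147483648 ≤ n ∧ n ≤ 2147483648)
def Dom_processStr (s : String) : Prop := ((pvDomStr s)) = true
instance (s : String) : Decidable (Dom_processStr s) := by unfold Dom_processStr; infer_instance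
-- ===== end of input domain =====

-- B replaces A's full-copy reversal with a two-stack deque whose '%' is an O(1) swap of the two stacks (an alternative algorithm; not measured faster).

-- ===== PORT A =====
-- one iteration of A's loop: result is the accumulated list of chars
def processStrStep (result : List Char) (c : Char) : List Char :=
  if c = '*' then
    if result ≠ [] then result.dropLast else result       -- result.pop()
  else if c = '#' then
    if result ≠ [] then result ++ result else result      -- result.extend(result)
  else if c = '%' then
    if result ≠ [] then result.reverse else result        -- result = result[::-1]
  else
    result ++ [c]                                         -- result.append(c)

def processStr (s : String) : String :=
  String.mk (s.toList.foldl processStrStep [])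

-- ===== PORT B =====
-- one iteration of B's loop: logical string = front.reverse ++ back
def processStrAltStep (st : List Char × List Char) (c : Char) : List Char × List Char :=
  let front := st.1
  let back := st.2
  if c = '*' then
    if back ≠ [] then (front, back.dropLast)
    else if front ≠ [] then ([], front.reverse.dropLast)
    else (front, back)
  else if c = '#' then
    if front ≠ [] ∨ back ≠ [] then
      let t := front.reverse ++ back
      ([], t ++ t)
    else (front, back)
  else if c = '%' then (back, front)
  else (front, back ++ [c])

def processStr_alt (s : String) : String :=
  let st := s.toList.foldl processStrAltStep ([], [])
  String.mk (st.1.reverse ++ st.2)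

-- ===== PRECONDITION & SPEC =====
def Spec_processStr (s : String) (out : String) : Prop := out = processStr_alt s
instance (s : String) (out : String) : Decidable (Spec_processStr s out) := by unfold Spec_processStr; infer_instance

-- ===== CLAIM (what is proved, stated in full; the proofs are below) =====
def Claim_equal_processStr : Prop := ∀ (s : String), Dom_processStr s → Spec_processStr s (processStr s)

-- ===== LEMMAS AND PROOFS =====

-- invariant: one B step tracks one A step through the two-stack representation
theorem altStep_inv (st : List Char × List Char) (c : Char) :
    (processStrAltStep st c).1.reverse ++ (processStrAltStep st c).2
      = processStrStep (st.1.reverse ++ st.2) c := by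
  obtain ⟨f, b⟩ := st
  unfold processStrAltStep processStrStep
  by_cases h1 : c = '*'
  · simp only [h1, if_pos rfl]
    by_cases hb : b = []
    · subst hb
      by_cases hf : f = [] <;> simp [hf]
    · have hfb : f.reverse ++ b ≠ [] := by simp [hb]
      simp [hb, hfb, List.dropLast_append_of_ne_nil]
  · by_cases h2 : c = '#'
    · simp only [h1, h2, if_neg, if_pos rfl, reduceIte]
      by_cases hfb : f ≠ [] ∨ b ≠ []
      · have hne : f.reverse ++ b ≠ [] := by
          rcases hfb with hf | hb
          · simp [hf]
          · simp [hb]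
        simp [hfb, hne]
      · have hf : f = [] := by tauto
        have hb : b = [] := by tauto
        simp [hf, hb, hfb]
    · by_cases h3 : c = '%'
      · subst h3
        simp only [h1, h2, reduceIte]
        by_cases hfb : f.reverse ++ b ≠ []
        · simp [hfb]
        · have h := of_not_not hfb
          have hf : f = [] := by
            have := congrArg List.length h; simp at this; simp [this.1]
          have hb : b = [] := by
            have := congrArg List.length h; simp at this; exact this.2
          simp [hf, hb, hfb]
      · simp [h1, h2, h3, List.append_assoc]

-- the invariant carried through the whole fold
theorem altFold_inv (l : List Char) (st : List Char × List Char) :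
    (l.foldl processStrAltStep st).1.reverse ++ (l.foldl processStrAltStep st).2
      = l.foldl processStrStep (st.1.reverse ++ st.2) := by
  induction l generalizing st with
  | nil => rfl
  | cons c l ih =>
      simp only [List.foldl_cons]
      rw [ih, altStep_inv]

-- ===== VERDICT (by name: the statement is the Claim_ definition above) =====
theorem processStr_spec : Claim_equal_processStr := by
  intro s _
  unfold Spec_processStr processStr processStr_alt
  simp only []
  rw [altFold_inv]
  rfl
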